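-- pv_equiv track=rewrite | github.com/vai-tv/Wordle-Bot | bot/utils.py | str_to_gyx
-- ===== SOURCE A (Python) =====
-- def str_to_gyx(string: str):
--     """Convert a string like 'GYXXG' to a list of greens, yellows, and greys."""
--
--     greens = []
--     yellows = []
--     greys = []
--     for i, ch in enumerate(string):
--         if ch == 'G':
--             greens.append((i))
--         elif ch == 'Y':
--             yellows.append((i))
--         elif ch == 'X':
--             greys.append((i))
--         else:
--             raise ValueError(f"Invalid character in pattern string: {ch}")
--     return greens, yellows, greys
-- ===== SOURCE B (Python) =====
-- def str_to_gyx(string: str):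
--     """Convert a string like 'GYXXG' to a list of greens, yellows, and greys."""
--     for ch in string:
--         if ch not in ('G', 'Y', 'X'):
--             raise ValueError(f"Invalid character in pattern string: {ch}")
--     greens = [i for i, ch in enumerate(string) if ch == 'G']
--     yellows = [i for i, ch in enumerate(string) if ch == 'Y']
--     greys = [i for i, ch in enumerate(string) if ch == 'X']
--     return greens, yellows, greys
-- ===== Notes on version B (the rewrite author's own statement) =====
-- stated objective: simpler
-- what changed: Replaced the single dispatch loop with three growing accumulators by a validation pass followed by three independent filtering comprehensions, one per colour.
import Mathlib
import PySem

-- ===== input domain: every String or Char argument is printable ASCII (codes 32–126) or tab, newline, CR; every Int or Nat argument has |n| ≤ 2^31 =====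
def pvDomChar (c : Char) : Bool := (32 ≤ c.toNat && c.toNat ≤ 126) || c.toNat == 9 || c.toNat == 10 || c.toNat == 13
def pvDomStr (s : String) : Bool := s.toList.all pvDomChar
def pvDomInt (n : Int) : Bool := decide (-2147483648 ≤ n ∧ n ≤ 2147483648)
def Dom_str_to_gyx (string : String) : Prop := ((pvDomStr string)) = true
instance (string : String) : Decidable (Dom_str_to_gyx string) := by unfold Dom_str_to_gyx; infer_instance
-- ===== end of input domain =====

-- B replaces A's single dispatch loop (three accumulators grown in one pass) by three
-- independent filtering passes, one per colour, after a validation pass; objective: simpler.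

-- ===== PORT A =====
-- A: one loop over enumerate(string), appending each index to the accumulator chosen by the
-- character; the 'else: raise ValueError' branch is excluded by Pre_ (the port keeps the
-- accumulators unchanged there).
def str_to_gyx (string : String) : List Int × List Int × List Int :=
  (PySem.List.enumerate string.toList).foldl
    (fun (acc : List Int × List Int × List Int) p =>
      if p.2 = 'G' then (acc.1 ++ [p.1], acc.2.1, acc.2.2)
      else if p.2 = 'Y' then (acc.1, acc.2.1 ++ [p.1], acc.2.2)
      else if p.2 = 'X' then (acc.1, acc.2.1, acc.2.2 ++ [p.1])
      else acc)
    ([], [], [])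

-- ===== PORT B =====
-- B: three independent comprehensions over enumerate(string); the validation pass only raises
-- (excluded by Pre_) and contributes no value, so it has no computational content here.
def str_to_gyx_alt (string : String) : List Int × List Int × List Int :=
  let cs := PySem.List.enumerate string.toList
  ((cs.filter (fun p => p.2 = 'G')).map (·.1),
   (cs.filter (fun p => p.2 = 'Y')).map (·.1),
   (cs.filter (fun p => p.2 = 'X')).map (·.1))

-- ===== PRECONDITION & SPEC =====
-- Pre_ excludes exactly the strings containing a character other than 'G','Y','X',
-- on which A raises ValueError.
def Pre_str_to_gyx (string : String) : Prop :=
  (string.toList.all (fun c => c == 'G' || c == 'Y' || c == 'X')) = true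
instance (string : String) : Decidable (Pre_str_to_gyx string) := by unfold Pre_str_to_gyx; infer_instance
def pvWitness_str_to_gyx : String := "GYXXG"
def Spec_str_to_gyx (string : String) (out : List Int × List Int × List Int) : Prop := out = str_to_gyx_alt string
instance (string : String) (out : List Int × List Int × List Int) : Decidable (Spec_str_to_gyx string out) := by unfold Spec_str_to_gyx; infer_instance

-- ===== CLAIM (what is proved, stated in full; the proofs are below) =====
def Claim_equal_str_to_gyx : Prop := ∀ (string : String), Dom_str_to_gyx string → Pre_str_to_gyx string → Spec_str_to_gyx string (str_to_gyx string)

-- ===== LEMMAS AND PROOFS =====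

-- Loop invariant for A's fold: starting from accumulators (g, y, x), the fold appends the
-- filtered indices of the remaining enumerated list to each component.
theorem pv_fold_char (l : List (Int × Char)) (g y x : List Int) :
    l.foldl
      (fun (acc : List Int × List Int × List Int) p =>
        if p.2 = 'G' then (acc.1 ++ [p.1], acc.2.1, acc.2.2)
        else if p.2 = 'Y' then (acc.1, acc.2.1 ++ [p.1], acc.2.2)
        else if p.2 = 'X' then (acc.1, acc.2.1, acc.2.2 ++ [p.1])
        else acc)
      (g, y, x)
    = (g ++ (l.filter (fun p => p.2 = 'G')).map (·.1),
       y ++ (l.filter (fun p => p.2 = 'Y')).map (·.1),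
       x ++ (l.filter (fun p => p.2 = 'X')).map (·.1)) := by
  induction l generalizing g y x with
  | nil => simp
  | cons p t ih =>
    simp only [List.foldl_cons, List.filter_cons]
    by_cases hG : p.2 = 'G'
    · simp [hG, ih]
    · by_cases hY : p.2 = 'Y'
      · simp [hY, ih]
      · by_cases hX : p.2 = 'X'
        · simp [hG, hX, ih]
        · simp [hG, hY, hX, ih]

-- ===== VERDICT (by name: the statement is the Claim_ definition above) =====
theorem str_to_gyx_spec : Claim_equal_str_to_gyx := by
  intro s _ _
  unfold Spec_str_to_gyx str_to_gyx str_to_gyx_alt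
  simp [pv_fold_char]
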